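-- pv_equiv track=rewrite | github.com/1TmT1/python_projects | for_test/question3.py | longest_lname
-- ===== SOURCE A (Python) =====
-- def longest_lname(arr):
--     max = 0
--     index = 0
--     for x in range(len(arr)):
--         if len(arr[x]["lname"]) > max:
--             max = len(arr[x]["lname"])
--             index = x
--     return arr[index]
-- ===== SOURCE B (Python) =====
-- def longest_lname(arr):
--     # Stable sort by descending lname length; the first element is the first maximal one.
--     return sorted(arr, key=lambda d: -len(d["lname"]))[0]
-- ===== Notes on version B (the rewrite author's own statement) =====
-- stated objective: alternative
-- what changed: Replaces the manual index-tracking running-max scan with a stable sort of the list by descending lname length, returning the first element of the sorted list (stability preserves A's first-wins tie rule).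
import Mathlib
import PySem

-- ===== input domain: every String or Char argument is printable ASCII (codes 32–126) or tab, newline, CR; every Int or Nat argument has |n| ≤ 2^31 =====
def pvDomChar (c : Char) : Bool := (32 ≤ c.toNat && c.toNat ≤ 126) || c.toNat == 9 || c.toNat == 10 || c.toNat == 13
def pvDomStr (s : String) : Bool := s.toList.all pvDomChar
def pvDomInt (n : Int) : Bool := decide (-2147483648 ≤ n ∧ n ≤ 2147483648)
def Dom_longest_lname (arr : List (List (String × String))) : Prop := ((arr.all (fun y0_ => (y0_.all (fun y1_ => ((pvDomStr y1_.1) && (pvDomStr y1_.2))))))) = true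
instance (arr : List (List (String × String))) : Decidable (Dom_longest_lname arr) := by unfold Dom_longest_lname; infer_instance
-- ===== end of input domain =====

-- B replaces A's index-tracking running-max scan by a stable sort on descending
-- lname length, taking the first element (an alternative algorithm, not faster).


-- len(d["lname"]), shared by both ports (the same expression both Pythons evaluate)
def pvKey (d : List (String × String)) : Int :=
  PySem.Str.len (((PySem.Dict.mk d).get? "lname").getD "")

-- ===== PORT A =====
def longest_lname (arr : List (List (String × String))) : List (String × String) :=
  -- max = 0; index = 0; for x in range(len(arr)): if len(arr[x]["lname"]) > max: …
  let s := (PySem.List.pyRange 0 (arr.length : Int) 1).foldl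
    (fun (s : Int × Int) x =>
      let l := pvKey ((PySem.List.pyGet? arr x).getD [])
      if s.1 < l then (l, x) else s) (0, 0)
  (PySem.List.pyGet? arr s.2).getD []

-- ===== PORT B =====
def longest_lname_alt (arr : List (List (String × String))) : List (String × String) :=
  -- sorted(arr, key=lambda d: -len(d["lname"]))[0]
  (PySem.List.pyGet? (PySem.List.sorted arr (fun d => -(pvKey d))) 0).getD []

-- ===== PRECONDITION & SPEC =====
-- Pre_ excludes exactly the inputs where Python A raises: the empty list (arr[0] → IndexError)
-- and any record without an "lname" key (KeyError); B raises on the same inputs.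
def Pre_longest_lname (arr : List (List (String × String))) : Prop :=
  arr ≠ [] ∧ ∀ d ∈ arr, ((PySem.Dict.mk d).get? "lname").isSome = true
instance (arr : List (List (String × String))) : Decidable (Pre_longest_lname arr) := by
  unfold Pre_longest_lname; infer_instance
def pvWitness_longest_lname : (List (List (String × String))) :=
  [[("lname", "ab"), ("fname", "x")], [("lname", "abc")]]
def Spec_longest_lname (arr : List (List (String × String))) (out : List (String × String)) : Prop := out = longest_lname_alt arr
instance (arr : List (List (String × String))) (out : List (String × String)) : Decidable (Spec_longest_lname arr out) := by unfold Spec_longest_lname; infer_instance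

-- ===== CLAIM (what is proved, stated in full; the proofs are below) =====
def Claim_equal_longest_lname : Prop := ∀ (arr : List (List (String × String))), Dom_longest_lname arr → Pre_longest_lname arr → Spec_longest_lname arr (longest_lname arr)

-- ===== LEMMAS AND PROOFS =====

-- "first element of xs attaining the maximal pvKey", written as the left fold both
-- programs' behaviours reduce to (later elements replace only on strictly greater key).
def pvStep (acc : Option (List (String × String))) (x : List (String × String)) :
    Option (List (String × String)) :=
  match acc with
  | none => some x
  | some m => if pvKey m < pvKey x then some x else some m

def pvFM (xs : List (List (String × String))) : Option (List (String × String)) :=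
  xs.foldl pvStep none

-- A's loop state as a function of the input
def pvF (arr : List (List (String × String))) : Int × Int :=
  (PySem.List.pyRange 0 (arr.length : Int) 1).foldl
    (fun (s : Int × Int) x =>
      let l := pvKey ((PySem.List.pyGet? arr x).getD [])
      if s.1 < l then (l, x) else s) (0, 0)

lemma pvGet_cons_zero (a : List (String × String)) (l : List (List (String × String))) :
    PySem.List.pyGet? (a :: l) 0 = some a := by
  have h0 : (0 : Int) = ((0 : Nat) : Int) := rfl
  rw [h0, PySem.List.pyGet?_natCast]
  simp

lemma pvKey_nonneg (d : List (String × String)) : 0 ≤ pvKey d := by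
  simp [pvKey, PySem.Str.len_eq]

lemma pvFM_append (ys : List (List (String × String))) (y : List (String × String)) :
    pvFM (ys ++ [y]) = pvStep (pvFM ys) y := by
  simp [pvFM, List.foldl_append]

lemma pvGet_append_left (ys zs : List (List (String × String))) (x : Int)
    (h0 : 0 ≤ x) (h1 : x < (ys.length : Int)) :
    PySem.List.pyGet? (ys ++ zs) x = PySem.List.pyGet? ys x := by
  obtain ⟨t, rfl⟩ : ∃ t : Nat, x = (t : Int) := ⟨x.toNat, (Int.toNat_of_nonneg h0).symm⟩
  rw [PySem.List.pyGet?_natCast, PySem.List.pyGet?_natCast]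
  exact List.getElem?_append_left (by exact_mod_cast h1)

lemma pvA_inv (arr : List (List (String × String))) (h : arr ≠ []) :
    ∃ m, pvFM arr = some m ∧
      0 ≤ (pvF arr).2 ∧ (pvF arr).2 < (arr.length : Int) ∧
      PySem.List.pyGet? arr (pvF arr).2 = some m ∧
      (pvF arr).1 = pvKey m ∧
      ∀ x ∈ arr, pvKey x ≤ (pvF arr).1 := by
  induction arr using List.reverseRecOn with
  | nil => exact absurd rfl h
  | append_singleton ys y ih =>
    by_cases hys : ys = []
    · subst hys
      simp only [List.nil_append]
      refine ⟨y, ?_, ?_⟩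
      · simp [pvFM, pvStep]
      · have hF : pvF [y] = (if (0:Int) < pvKey y then (pvKey y, 0) else (0, 0)) := by
          simp [pvF, PySem.List.pyRange, PySem.List.pyGet?, PySem.List.pyIdx?]
        by_cases hk : (0:Int) < pvKey y
        · rw [hF, if_pos hk]
          refine ⟨by norm_num, by norm_num, pvGet_cons_zero y [], rfl, ?_⟩
          intro x hx; simp at hx; subst hx; rfl
        · have hk0 : pvKey y = 0 := le_antisymm (not_lt.mp hk) (pvKey_nonneg y)
          rw [hF, if_neg hk]
          refine ⟨by norm_num, by norm_num, pvGet_cons_zero y [], by simp [hk0], ?_⟩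
          intro x hx; simp at hx; subst hx; simp [hk0]
    · obtain ⟨m, hfm, hI0, hIlt, hget, hM, hbound⟩ := ih hys
      -- unfold pvF on ys ++ [y]
      have hlen : ((ys ++ [y]).length : Int) = (ys.length : Int) + 1 := by
        simp
      have hrange : PySem.List.pyRange 0 ((ys ++ [y]).length : Int) 1
          = PySem.List.pyRange 0 (ys.length : Int) 1 ++ [(ys.length : Int)] := by
        rw [hlen]
        exact PySem.List.pyRange_one_succ_right (by positivity)
      have hcongr : (PySem.List.pyRange 0 (ys.length : Int) 1).foldl
          (fun (s : Int × Int) x =>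
            let l := pvKey ((PySem.List.pyGet? (ys ++ [y]) x).getD [])
            if s.1 < l then (l, x) else s) (0, 0) = pvF ys := by
        unfold pvF
        apply PySem.List.foldl_congr_mem
        intro acc x hx
        have hb := (PySem.List.mem_pyRange_one).mp hx
        rw [pvGet_append_left ys [y] x hb.1 hb.2]
      have hgety : PySem.List.pyGet? (ys ++ [y]) (ys.length : Int) = some y := by
        rw [PySem.List.pyGet?_natCast]
        simp
      have hF : pvF (ys ++ [y]) =
          (if (pvF ys).1 < pvKey y then (pvKey y, (ys.length : Int)) else pvF ys) := by
        show (PySem.List.pyRange 0 ((ys ++ [y]).length : Int) 1).foldl _ (0,0) = _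
        rw [hrange, List.foldl_append, hcongr]
        simp only [List.foldl_cons, List.foldl_nil, hgety, Option.getD_some]
      rw [pvFM_append, hfm]
      by_cases hlt : (pvF ys).1 < pvKey y
      · refine ⟨y, ?_, ?_, ?_, ?_, ?_, ?_⟩
        · simp [pvStep, hM ▸ hlt]
        · rw [hF, if_pos hlt]; positivity
        · rw [hF, if_pos hlt, hlen]; exact lt_add_one _
        · rw [hF, if_pos hlt]; exact hgety
        · rw [hF, if_pos hlt]
        · intro x hx
          rw [hF, if_pos hlt]
          rcases List.mem_append.mp hx with hx | hx
          · exact le_of_lt (lt_of_le_of_lt (hbound x hx) hlt)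
          · simp at hx; subst hx; rfl
      · refine ⟨m, ?_, ?_, ?_, ?_, ?_, ?_⟩
        · simp [pvStep, hM ▸ hlt]
        · rw [hF, if_neg hlt]; exact hI0
        · rw [hF, if_neg hlt, hlen]; omega
        · rw [hF, if_neg hlt]
          rw [pvGet_append_left ys [y] _ hI0 hIlt]; exact hget
        · rw [hF, if_neg hlt]; exact hM
        · intro x hx
          rw [hF, if_neg hlt]
          rcases List.mem_append.mp hx with hx | hx
          · exact hbound x hx
          · simp at hx; subst hx; exact not_lt.mp hlt
    
lemma pvB_head (arr : List (List (String × String))) :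
    (PySem.List.sorted arr (fun d => -(pvKey d))).head? = pvFM arr := by
  induction arr using List.reverseRecOn with
  | nil => simp [PySem.List.sorted_eq_foldl_insertBy, pvFM]
  | append_singleton ys y ih =>
    rw [pvFM_append, ← ih]
    rw [PySem.List.sorted_eq_foldl_insertBy, List.foldl_append,
        ← PySem.List.sorted_eq_foldl_insertBy]
    simp only [List.foldl_cons, List.foldl_nil]
    cases hs : PySem.List.sorted ys (fun d => -(pvKey d)) with
    | nil => simp [PySem.List.insertBy, pvStep]
    | cons m t =>
      simp only [List.head?_cons]
      rw [PySem.List.insertBy]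
      by_cases hlt : pvKey m < pvKey y
      · rw [if_pos (by simpa using hlt)]
        simp [pvStep, hlt]
      · rw [if_neg (by simpa using hlt)]
        simp [pvStep, hlt]

theorem longest_lname_spec : Claim_equal_longest_lname := by
  intro arr _ hpre
  unfold Spec_longest_lname
  obtain ⟨m, hfm, hI0, hIlt, hget, -, -⟩ := pvA_inv arr hpre.1
  have hA : longest_lname arr = m := by
    show (PySem.List.pyGet? arr (pvF arr).2).getD [] = m
    rw [hget]; rfl
  have hB : longest_lname_alt arr = m := by
    have hh := pvB_head arr
    rw [hfm] at hh
    cases hs : PySem.List.sorted arr (fun d => -(pvKey d)) with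
    | nil => rw [hs] at hh; simp at hh
    | cons a t =>
      rw [hs] at hh
      simp only [List.head?_cons, Option.some.injEq] at hh
      show (PySem.List.pyGet? (PySem.List.sorted arr (fun d => -(pvKey d))) 0).getD [] = m
      rw [hs, pvGet_cons_zero]
      simpa using hh
  rw [hA, hB]
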